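-- pv_equiv track=rewrite | github.com/JakeSaunders1995/comp16321MarkingMid | unpacked_repos/t28063tz_prog2_encryption/rugby_t28063tz.py | solve
-- ===== SOURCE A (Python) =====
-- def solve(input_str):
--     T1 = 0
--     T2 = 0
--     for b in [input_str[i:i+3] for i in range(0, len(input_str), 3)] :
--         add = 0
--         if (b[2] == 't') : add = 5
--         if (b[2] == 'c') : add = 2
--         if (b[2] == 'p') : add = 3
--         if (b[2] == 'd') : add = 3
--         if (b[1] == '1') : T1 += add
--         if (b[1] == '2') : T2 += add
--     return T1, T2
-- ===== SOURCE B (Python) =====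
-- def solve(input_str):
--     # Extract the (team, score) character pair of each triplet, then get each
--     # total in closed form from pair frequencies: no scoring accumulation loop.
--     pairs = [(input_str[i + 1], input_str[i + 2])
--              for i in range(0, len(input_str), 3)]
--
--     def total(team):
--         return (5 * pairs.count((team, 't')) + 2 * pairs.count((team, 'c'))
--                 + 3 * pairs.count((team, 'p')) + 3 * pairs.count((team, 'd')))
--
--     return total('1'), total('2')
-- ===== Notes on version B (the rewrite author's own statement) =====
-- stated objective: alternative
-- what changed: A slices the string into 3-char chunks and accumulates both team totals in one scoring loop with cascading if-reassignments; B never accumulates scores: it extracts only the (team, score) character pair of each triplet and then computes each total in closed form as a weighted sum of pair frequencies obtained by four list.count scans per team.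
import Mathlib
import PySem

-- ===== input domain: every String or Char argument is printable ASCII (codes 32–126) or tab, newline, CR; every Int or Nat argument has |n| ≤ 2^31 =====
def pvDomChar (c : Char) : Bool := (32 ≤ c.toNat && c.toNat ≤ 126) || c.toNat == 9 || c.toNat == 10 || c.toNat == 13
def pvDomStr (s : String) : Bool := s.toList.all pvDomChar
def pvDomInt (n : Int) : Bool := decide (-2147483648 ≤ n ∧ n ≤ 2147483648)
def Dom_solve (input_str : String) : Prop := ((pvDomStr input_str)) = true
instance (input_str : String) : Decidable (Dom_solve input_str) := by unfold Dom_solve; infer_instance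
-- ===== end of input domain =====

-- B replaces A's per-triplet scoring accumulation by extraction of the (team, score) character
-- pairs followed by closed-form weighted pair-frequency sums (alternative decomposition, same cost).

-- ===== PORT A =====
def solve (input_str : String) : Int × Int :=
  ((PySem.List.pyRange 0 (PySem.Str.len input_str) 3).map
      (fun i => PySem.Str.slice input_str (some i) (some (i + 3)))).foldl
    (fun (acc : Int × Int) b =>
      let add : Int := 0
      let add := if PySem.Str.pyGet? b 2 = some 't' then 5 else add
      let add := if PySem.Str.pyGet? b 2 = some 'c' then 2 else add
      let add := if PySem.Str.pyGet? b 2 = some 'p' then 3 else add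
      let add := if PySem.Str.pyGet? b 2 = some 'd' then 3 else add
      let t1 := if PySem.Str.pyGet? b 1 = some '1' then acc.1 + add else acc.1
      let t2 := if PySem.Str.pyGet? b 1 = some '2' then acc.2 + add else acc.2
      (t1, t2)) (0, 0)

-- ===== PORT B =====
def solve_alt (input_str : String) : Int × Int :=
  -- input_str[i+1] / input_str[i+2]: exact on every input Pre_ admits (the index is then in
  -- range, so pyGet? is some); '.getD ' '' only totalizes the out-of-range case, where Python raises.
  let pairs := (PySem.List.pyRange 0 (PySem.Str.len input_str) 3).map
      (fun i => ((PySem.Str.pyGet? input_str (i + 1)).getD ' ',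
                 (PySem.Str.pyGet? input_str (i + 2)).getD ' '))
  let total := fun (team : Char) =>
    5 * (PySem.List.count pairs (team, 't') : Int) + 2 * (PySem.List.count pairs (team, 'c') : Int)
      + 3 * (PySem.List.count pairs (team, 'p') : Int) + 3 * (PySem.List.count pairs (team, 'd') : Int)
  (total '1', total '2')

-- ===== PRECONDITION & SPEC =====
-- Pre_ excludes exactly the inputs whose length is not a multiple of 3: there A raises IndexError on b[2].
def Pre_solve (input_str : String) : Prop := input_str.toList.length % 3 = 0
instance (input_str : String) : Decidable (Pre_solve input_str) := by unfold Pre_solve; infer_instance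
def pvWitness_solve : String := "x1tz2c"

def Spec_solve (input_str : String) (out : Int × Int) : Prop := out = solve_alt input_str
instance (input_str : String) (out : Int × Int) : Decidable (Spec_solve input_str out) := by unfold Spec_solve; infer_instance

-- ===== CLAIM (what is proved, stated in full; the proofs are below) =====
def Claim_equal_solve : Prop := ∀ (input_str : String), Dom_solve input_str → Pre_solve input_str → Spec_solve input_str (solve input_str)

-- ===== LEMMAS AND PROOFS =====

-- points value of a score character
def valOf (c : Char) : Int :=
  if c = 't' then 5 else if c = 'c' then 2 else if c = 'p' then 3 else if c = 'd' then 3 else 0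

-- A's loop body at the List Char level
def stepA (acc : Int × Int) (b : List Char) : Int × Int :=
  let add : Int := 0
  let add := if PySem.List.pyGet? b 2 = some 't' then 5 else add
  let add := if PySem.List.pyGet? b 2 = some 'c' then 2 else add
  let add := if PySem.List.pyGet? b 2 = some 'p' then 3 else add
  let add := if PySem.List.pyGet? b 2 = some 'd' then 3 else add
  let t1 := if PySem.List.pyGet? b 1 = some '1' then acc.1 + add else acc.1
  let t2 := if PySem.List.pyGet? b 1 = some '2' then acc.2 + add else acc.2
  (t1, t2)

-- the (team char, score char) pairs of the m complete triplets
def pairsL (m : Nat) (cs : List Char) : List (Char × Char) :=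
  (List.range m).map (fun k => (cs.getD (3*k+1) ' ', cs.getD (3*k+2) ' '))

-- the total of team t over those pairs
def sumT (t : Char) (m : Nat) (cs : List Char) : Int :=
  ((pairsL m cs).map (fun p => if p.1 = t then valOf p.2 else 0)).sum

lemma chain_eq_valOf (c : Char) :
    (if c = 'd' then (3:Int) else if c = 'p' then 3 else if c = 'c' then 2 else if c = 't' then 5 else 0)
      = valOf c := by
  unfold valOf
  by_cases h1 : c = 't'
  · subst h1; decide
  by_cases h2 : c = 'c'
  · subst h2; decide
  by_cases h3 : c = 'p'
  · subst h3; decide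
  by_cases h4 : c = 'd'
  · subst h4; decide
  simp [h1, h2, h3, h4]

lemma stepA_chunk (acc : Int × Int) (a b c : Char) :
    stepA acc [a, b, c]
      = (acc.1 + (if b = '1' then valOf c else 0), acc.2 + (if b = '2' then valOf c else 0)) := by
  have h2 : PySem.List.pyGet? [a, b, c] 2 = some c := by
    simp [PySem.List.pyGet?, PySem.List.pyIdx?]
  have h1 : PySem.List.pyGet? [a, b, c] 1 = some b := by
    simp [PySem.List.pyGet?, PySem.List.pyIdx?]
  simp only [stepA, h1, h2, Option.some.injEq]
  rw [chain_eq_valOf]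
  simp only [Prod.mk.injEq]
  constructor <;> (split_ifs <;> simp)

lemma pairsL_cons (m : Nat) (a b c : Char) (rest : List Char) :
    pairsL (m+1) (a :: b :: c :: rest) = (b, c) :: pairsL m rest := by
  unfold pairsL
  rw [List.range_succ_eq_map, List.map_cons, List.map_map]
  congr 1

lemma sumT_cons (t : Char) (m : Nat) (a b c : Char) (rest : List Char) :
    sumT t (m+1) (a :: b :: c :: rest) = (if b = t then valOf c else 0) + sumT t m rest := by
  unfold sumT
  rw [pairsL_cons]
  by_cases hb : b = t <;> simp [hb]

lemma foldA_eq (m : Nat) : ∀ (cs : List Char) (acc : Int × Int), cs.length = 3*m →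
    (List.range m).foldl (fun acc k => stepA acc ((cs.drop (3*k)).take 3)) acc
      = (acc.1 + sumT '1' m cs, acc.2 + sumT '2' m cs) := by
  induction m with
  | zero => intro cs acc h; simp [sumT, pairsL]
  | succ m ih =>
    intro cs acc h
    rcases cs with _ | ⟨a, _ | ⟨b, _ | ⟨c, rest⟩⟩⟩ <;> simp only [List.length] at h <;> try omega
    have hrest : rest.length = 3*m := by omega
    rw [List.range_succ_eq_map, List.foldl_cons]
    have h0 : (((a :: b :: c :: rest).drop (3*0)).take 3) = [a, b, c] := rfl
    rw [h0, List.foldl_map]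
    have hshift : (List.range m).foldl
          (fun acc' k => stepA acc' (((a :: b :: c :: rest).drop (3 * Nat.succ k)).take 3))
          (stepA acc [a, b, c])
        = (List.range m).foldl (fun acc' k => stepA acc' ((rest.drop (3*k)).take 3))
            (stepA acc [a, b, c]) := by
      apply PySem.List.foldl_congr_mem
      intro acc' k _
      have e : 3 * Nat.succ k = (3*k) + 1 + 1 + 1 := by omega
      simp [e]
    rw [hshift, ih rest _ hrest, stepA_chunk, sumT_cons, sumT_cons]
    simp [add_assoc]

-- B's weighted pair-frequency sum equals the per-pair scored sum
lemma weighted_count_eq (L : List (Char × Char)) (t : Char) :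
    5 * (List.count (t, 't') L : Int) + 2 * (List.count (t, 'c') L : Int)
      + 3 * (List.count (t, 'p') L : Int) + 3 * (List.count (t, 'd') L : Int)
      = (L.map (fun p => if p.1 = t then valOf p.2 else 0)).sum := by
  induction L with
  | nil => simp
  | cons p L ih =>
    obtain ⟨x, y⟩ := p
    simp only [List.count_cons, List.map_cons, List.sum_cons, ← ih, beq_iff_eq, Prod.mk.injEq]
    push_cast
    split_ifs <;> simp_all [valOf] <;> linarith [ih]

-- ===== VERDICT (by name: the statement is the Claim_ definition above) =====
theorem solve_spec : Claim_equal_solve := by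
  intro s _ hpre
  unfold Spec_solve
  have hpre' : s.toList.length % 3 = 0 := hpre
  obtain ⟨m, hm⟩ : ∃ m, s.toList.length = 3*m := ⟨s.toList.length / 3, by omega⟩
  have hA : solve s = ((0:Int) + sumT '1' m s.toList, (0:Int) + sumT '2' m s.toList) := by
    unfold solve
    rw [PySem.Str.len_eq, PySem.List.pyRange_of_pos 0 _ (by norm_num)]
    have hcount : (if (0:Int) < (s.toList.length : Int) then
        (((s.toList.length : Int) - 0 + 3 - 1) / 3).toNat else 0) = m := by
      split_ifs with h' <;> omega
    rw [hcount, List.map_map, List.foldl_map]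
    refine Eq.trans (PySem.List.foldl_congr_mem _ _
      (fun acc k => stepA acc ((s.toList.drop (3*k)).take 3)) _ ?_) ?_
    · intro acc k _
      have e1 : (0:Int) + 3*(k:Int) = ((3*k : Nat) : Int) := by push_cast; ring
      simp only [Function.comp_apply, e1, PySem.Str.slice, PySem.Chars.slice,
        PySem.Str.pyGet?, PySem.Chars.pyGet?, String.toList_ofList, stepA]
      have hsl : PySem.List.slice s.toList (some ((3*k : Nat) : Int)) (some (((3*k : Nat) : Int) + 3))
          = (s.toList.drop (3*k)).take 3 := by
        have e3 : ((3*k : Nat) : Int) + 3 = ((3*k + 3 : Nat) : Int) := by push_cast; ring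
        rw [e3, PySem.List.slice_natCast]
        congr 1
        omega
      rw [hsl]
    · exact foldA_eq m s.toList (0, 0) hm
  have hB : solve_alt s = (sumT '1' m s.toList, sumT '2' m s.toList) := by
    unfold solve_alt
    rw [PySem.Str.len_eq, PySem.List.pyRange_of_pos 0 _ (by norm_num)]
    have hcount : (if (0:Int) < (s.toList.length : Int) then
        (((s.toList.length : Int) - 0 + 3 - 1) / 3).toNat else 0) = m := by
      split_ifs with h' <;> omega
    rw [hcount, List.map_map]
    have htab : (List.map ((fun i => ((PySem.Str.pyGet? s (i + 1)).getD ' ',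
            (PySem.Str.pyGet? s (i + 2)).getD ' ')) ∘ fun k : Nat => 0 + 3*(k:Int))
          (List.range m)) = pairsL m s.toList := by
      unfold pairsL
      apply List.map_congr_left
      intro k _
      have e1 : (0:Int) + 3*(k:Int) + 1 = ((3*k + 1 : Nat) : Int) := by push_cast; ring
      have e2 : (0:Int) + 3*(k:Int) + 2 = ((3*k + 2 : Nat) : Int) := by push_cast; ring
      simp only [Function.comp_apply, e1, e2, PySem.Str.pyGet?, PySem.Chars.pyGet?,
        PySem.List.pyGet?_natCast, List.getD_eq_getElem?_getD]
    rw [htab]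
    simp only [PySem.List.count_eq]
    rw [weighted_count_eq, weighted_count_eq]
    unfold sumT
    rfl
  rw [hA, hB]
  simp
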